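-- pv_equiv track=rewrite | github.com/jaceksan/hiring-task-starter | backend/engine/duckdb_impl/geoparquet/policy.py | prioritize_road_classes
-- ===== SOURCE A (Python) =====
-- ROAD_CLASS_PRIORITY_GROUPS: list[tuple[str, ...]] = [
--     ("motorway", "motorway_link"),
--     ("trunk", "trunk_link"),
--     ("primary", "primary_link"),
--     ("secondary", "secondary_link"),
--     ("tertiary", "tertiary_link"),
-- ]
--
-- def prioritize_road_classes(classes: set[str]) -> list[tuple[str, ...]]:
--     out: list[tuple[str, ...]] = []
--     remaining = {str(c).strip() for c in classes if str(c).strip()}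
--     for group in ROAD_CLASS_PRIORITY_GROUPS:
--         picked = tuple(c for c in group if c in remaining)
--         if not picked:
--             continue
--         out.append(picked)
--         remaining.difference_update(picked)
--     if remaining:
--         out.append(tuple(sorted(remaining)))
--     return out
-- ===== SOURCE B (Python) =====
-- ROAD_CLASS_PRIORITY_GROUPS: list[tuple[str, ...]] = [
--     ("motorway", "motorway_link"),
--     ("trunk", "trunk_link"),
--     ("primary", "primary_link"),
--     ("secondary", "secondary_link"),
--     ("tertiary", "tertiary_link"),
-- ]
--
-- # class -> (group index, position inside the group), built once from the table
-- _CLASS_SLOT = {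
--     c: (gi, pos)
--     for gi, group in enumerate(ROAD_CLASS_PRIORITY_GROUPS)
--     for pos, c in enumerate(group)
-- }
--
--
-- def prioritize_road_classes(classes: set[str]) -> list[tuple[str, ...]]:
--     norm = {str(c).strip() for c in classes if str(c).strip()}
--     buckets: list[list[tuple[int, str]]] = [[], [], [], [], []]
--     leftovers: list[str] = []
--     for c in norm:
--         slot = _CLASS_SLOT.get(c)
--         if slot is not None:
--             gi, pos = slot
--             buckets[gi].append((pos, c))
--         else:
--             leftovers.append(c)
--     out: list[tuple[str, ...]] = []
--     for bucket in buckets: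
--         if bucket:
--             out.append(tuple(c for _, c in sorted(bucket, key=lambda pc: pc[0])))
--     if leftovers:
--         out.append(tuple(sorted(leftovers)))
--     return out
-- ===== Notes on version B (the rewrite author's own statement) =====
-- stated objective: alternative
-- what changed: Instead of scanning each priority group against a shrinking 'remaining' set, B makes a single pass over the normalized classes, routing each class through a precomputed class->(group index, position) lookup table into per-group buckets (ordered by stored position) plus a leftover list, then emits non-empty buckets in group order followed by the sorted leftovers.
import Mathlib
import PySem

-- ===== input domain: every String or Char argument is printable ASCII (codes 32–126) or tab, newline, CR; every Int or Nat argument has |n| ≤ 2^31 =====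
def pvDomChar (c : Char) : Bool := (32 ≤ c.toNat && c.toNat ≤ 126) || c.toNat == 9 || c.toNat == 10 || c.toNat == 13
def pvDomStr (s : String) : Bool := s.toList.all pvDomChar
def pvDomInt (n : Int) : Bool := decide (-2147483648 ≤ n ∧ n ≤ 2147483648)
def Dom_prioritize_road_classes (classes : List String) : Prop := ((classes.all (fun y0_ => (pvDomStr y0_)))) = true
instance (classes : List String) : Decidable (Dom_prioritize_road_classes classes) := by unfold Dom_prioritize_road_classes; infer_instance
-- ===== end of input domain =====

-- B replaces A's per-priority-group scans of the shrinking `remaining` set by one pass over the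
-- normalized classes through a precomputed class→(group index, position) table into buckets
-- (objective: alternative decomposition; same return value).

-- ===== PORT A =====
def ROAD_CLASS_PRIORITY_GROUPS : List (List String) :=
  [["motorway", "motorway_link"],
   ["trunk", "trunk_link"],
   ["primary", "primary_link"],
   ["secondary", "secondary_link"],
   ["tertiary", "tertiary_link"]]

-- body of A's `for group in ROAD_CLASS_PRIORITY_GROUPS` loop; state = (out, remaining)
def pvStepA (st : List (List String) × PySem.Set String) (group : List String) :
    List (List String) × PySem.Set String :=
  let picked := group.filter (fun c => PySem.Set.contains st.2 c)
  if picked = [] then st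
  else (st.1 ++ [picked], picked.foldl PySem.Set.discard st.2)

def prioritize_road_classes (classes : List String) : List (List String) :=
  let remaining : PySem.Set String :=
    PySem.Set.ofList ((classes.map PySem.Str.strip).filter (fun s => s ≠ ""))
  let st := ROAD_CLASS_PRIORITY_GROUPS.foldl pvStepA ([], remaining)
  if st.2 = [] then st.1
  else st.1 ++ [PySem.List.sorted st.2 (fun x => x)]

-- ===== PORT B =====
-- _CLASS_SLOT: class → (group index, position inside the group)
def pvSlot : PySem.Dict String (Int × Int) :=
  PySem.Dict.ofList
    [("motorway", (0, 0)),
     ("motorway_link", (0, 1)),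
     ("trunk", (1, 0)),
     ("trunk_link", (1, 1)),
     ("primary", (2, 0)),
     ("primary_link", (2, 1)),
     ("secondary", (3, 0)),
     ("secondary_link", (3, 1)),
     ("tertiary", (4, 0)),
     ("tertiary_link", (4, 1))]


-- body of B's `for c in norm` loop; state = (buckets, leftovers)
def pvStepB (st : List (List (Int × String)) × List String) (c : String) :
    List (List (Int × String)) × List String :=
  match PySem.Dict.get? pvSlot c with
  | some gp => (st.1.set gp.1.toNat (st.1.getD gp.1.toNat [] ++ [(gp.2, c)]), st.2)
  | none => (st.1, st.2 ++ [c])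


-- body of B's `for bucket in buckets` loop
def pvEmitB (out : List (List String)) (b : List (Int × String)) : List (List String) :=
  if b = [] then out
  else out ++ [(PySem.List.sorted b (fun pc => pc.1)).map (fun pc => pc.2)]


def prioritize_road_classes_alt (classes : List String) : List (List String) :=
  let norm : PySem.Set String :=
    PySem.Set.ofList ((classes.map PySem.Str.strip).filter (fun s => s ≠ ""))
  let st := norm.foldl pvStepB ([[], [], [], [], []], [])
  let out := st.1.foldl pvEmitB []
  if st.2 = [] then out
  else out ++ [PySem.List.sorted st.2 (fun x => x)]

-- ===== PRECONDITION & SPEC =====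
def Spec_prioritize_road_classes (classes : List String) (out : List (List String)) : Prop := out = prioritize_road_classes_alt classes
instance (classes : List String) (out : List (List String)) : Decidable (Spec_prioritize_road_classes classes out) := by unfold Spec_prioritize_road_classes; infer_instance

-- ===== CLAIM (what is proved, stated in full; the proofs are below) =====
def Claim_equal_prioritize_road_classes : Prop := ∀ (classes : List String), Dom_prioritize_road_classes classes → Spec_prioritize_road_classes classes (prioritize_road_classes classes)

-- ===== LEMMAS AND PROOFS =====

-- picked classes of one group against a remaining set (A's `picked`, B's per-group output)
def pvPick (s : PySem.Set String) (g : List String) : List String :=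
  g.filter (fun c => PySem.Set.contains s c)


-- bucket `i` and the leftovers as functions of the whole normalized list
def pvBkt (i : Int) (xs : List String) : List (Int × String) :=
  xs.filterMap (fun c =>
    match PySem.Dict.get? pvSlot c with
    | some gp => if gp.1 = i then some (gp.2, c) else none
    | none => none)

def pvLft (xs : List String) : List String :=
  xs.filter (fun c => (PySem.Dict.get? pvSlot c).isNone)

lemma mem_pvPick (c : String) (s g : List String) : c ∈ pvPick s g ↔ c ∈ g ∧ c ∈ s := by
  simp [pvPick, PySem.Set.contains]

lemma pv_foldl_discard (l s : List String) :
    l.foldl PySem.Set.discard s = s.filter (fun c => !l.contains c) := by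
  induction l generalizing s with
  | nil => simp
  | cons a l ih =>
    simp only [List.foldl_cons, ih, PySem.Set.discard, List.filter_filter]
    apply List.filter_congr
    intro c _
    cases h : c == a <;> cases h2 : l.contains c <;>
      simp [h, h2] <;> simp at h h2 <;> simp [h, h2]

lemma pv_foldA (gs : List (List String)) (o : List (List String)) (s : List String)
    (hd : gs.Pairwise (fun g g' => ∀ c ∈ g', c ∉ g)) :
    gs.foldl pvStepA (o, s)
      = (gs.foldl (fun o g => if pvPick s g = [] then o else o ++ [pvPick s g]) o,
         s.filter (fun c => !gs.flatten.contains c)) := by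
  induction gs generalizing o s with
  | nil => simp
  | cons g rest ih =>
    rcases List.pairwise_cons.mp hd with ⟨hg, hrest⟩
    by_cases hp : pvPick s g = []
    · -- group contributes nothing; remaining unchanged
      have hp' : g.filter (fun c => PySem.Set.contains s c) = [] := hp
      have hstep : pvStepA (o, s) g = (o, s) := by
        simp only [pvStepA, hp']; rfl
      rw [List.foldl_cons, hstep, ih o s hrest, List.foldl_cons, if_pos hp]
      simp only [Prod.mk.injEq]
      refine ⟨trivial, ?_⟩
      apply List.filter_congr
      intro c hc
      have hcg : c ∉ g := by
        intro hmem
        have := List.filter_eq_nil_iff.mp hp' c hmem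
        simp [PySem.Set.contains] at this
        exact this hc
      simp [List.flatten_cons, hcg]
    · have hstep : pvStepA (o, s) g
          = (o ++ [pvPick s g], s.filter (fun c => !(pvPick s g).contains c)) := by
        simp only [pvStepA, pvPick] at *
        rw [if_neg hp, pv_foldl_discard]
      rw [List.foldl_cons, hstep, ih _ _ hrest, List.foldl_cons, if_neg hp]
      simp only [Prod.mk.injEq]
      constructor
      · -- outputs: rest's picks against the filtered set equal picks against s
        apply PySem.List.foldl_congr_mem
        intro acc g' hg'
        have : pvPick (s.filter (fun c => !(pvPick s g).contains c)) g' = pvPick s g' := by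
          apply List.filter_congr
          intro c hc
          have hcg : c ∉ g := fun h => hg g' hg' c hc h
          have hcp : c ∉ pvPick s g := fun h => hcg ((mem_pvPick c s g).mp h).1
          simp [PySem.Set.contains, List.mem_filter, hcp]
        rw [this]
      · rw [List.filter_filter]
        apply List.filter_congr
        intro c hc
        by_cases hcg : c ∈ g
        · -- c ∈ g: c ∈ s so c ∈ pick, both sides false
          have hcp : c ∈ pvPick s g := (mem_pvPick c s g).mpr ⟨hcg, hc⟩
          simp [hcp, List.flatten_cons, hcg]
        · have hcp : c ∉ pvPick s g := fun h => hcg ((mem_pvPick c s g).mp h).1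
          simp [hcp, List.flatten_cons, hcg]

lemma pvSlot_items : pvSlot = ⟨[("motorway", (0, 0)), ("motorway_link", (0, 1)), ("trunk", (1, 0)), ("trunk_link", (1, 1)), ("primary", (2, 0)), ("primary_link", (2, 1)), ("secondary", (3, 0)), ("secondary_link", (3, 1)), ("tertiary", (4, 0)), ("tertiary_link", (4, 1))]⟩ := by decide

lemma pv_get_none (c : String) (h0 : ¬c = "motorway") (h1 : ¬c = "motorway_link") (h2 : ¬c = "trunk") (h3 : ¬c = "trunk_link") (h4 : ¬c = "primary") (h5 : ¬c = "primary_link") (h6 : ¬c = "secondary") (h7 : ¬c = "secondary_link") (h8 : ¬c = "tertiary") (h9 : ¬c = "tertiary_link") :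
    PySem.Dict.get? pvSlot c = none := by
  rw [pvSlot_items]
  have g0 : ¬"motorway" = c := fun h => h0 h.symm
  have g1 : ¬"motorway_link" = c := fun h => h1 h.symm
  have g2 : ¬"trunk" = c := fun h => h2 h.symm
  have g3 : ¬"trunk_link" = c := fun h => h3 h.symm
  have g4 : ¬"primary" = c := fun h => h4 h.symm
  have g5 : ¬"primary_link" = c := fun h => h5 h.symm
  have g6 : ¬"secondary" = c := fun h => h6 h.symm
  have g7 : ¬"secondary_link" = c := fun h => h7 h.symm
  have g8 : ¬"tertiary" = c := fun h => h8 h.symm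
  have g9 : ¬"tertiary_link" = c := fun h => h9 h.symm
  simp [PySem.Dict.get?_mk_cons, PySem.Dict.get?, g0, g1, g2, g3, g4, g5, g6, g7, g8, g9]

lemma pv_foldB (xs : List String) (b0 b1 b2 b3 b4 : List (Int × String)) (l : List String) :
    xs.foldl pvStepB ([b0, b1, b2, b3, b4], l)
      = ([b0 ++ pvBkt 0 xs, b1 ++ pvBkt 1 xs, b2 ++ pvBkt 2 xs, b3 ++ pvBkt 3 xs, b4 ++ pvBkt 4 xs],
         l ++ pvLft xs) := by
  induction xs generalizing b0 b1 b2 b3 b4 l with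
  | nil => simp [pvBkt, pvLft]
  | cons c xs ih =>
    by_cases h0 : c = "motorway"
    · subst h0
      rw [List.foldl_cons,
          show pvStepB ([b0, b1, b2, b3, b4], l) "motorway"
              = ([b0 ++ [((0 : Int), "motorway")], b1, b2, b3, b4], l) from rfl,
          ih]
      have e : PySem.Dict.get? pvSlot "motorway" = some ((0 : Int), (0 : Int)) := rfl
      simp [pvBkt, pvLft, e]
    by_cases h1 : c = "motorway_link"
    · subst h1
      rw [List.foldl_cons,
          show pvStepB ([b0, b1, b2, b3, b4], l) "motorway_link"
              = ([b0 ++ [((1 : Int), "motorway_link")], b1, b2, b3, b4], l) from rfl,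
          ih]
      have e : PySem.Dict.get? pvSlot "motorway_link" = some ((0 : Int), (1 : Int)) := rfl
      simp [pvBkt, pvLft, e]
    by_cases h2 : c = "trunk"
    · subst h2
      rw [List.foldl_cons,
          show pvStepB ([b0, b1, b2, b3, b4], l) "trunk"
              = ([b0, b1 ++ [((0 : Int), "trunk")], b2, b3, b4], l) from rfl,
          ih]
      have e : PySem.Dict.get? pvSlot "trunk" = some ((1 : Int), (0 : Int)) := rfl
      simp [pvBkt, pvLft, e]
    by_cases h3 : c = "trunk_link"
    · subst h3
      rw [List.foldl_cons,
          show pvStepB ([b0, b1, b2, b3, b4], l) "trunk_link"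
              = ([b0, b1 ++ [((1 : Int), "trunk_link")], b2, b3, b4], l) from rfl,
          ih]
      have e : PySem.Dict.get? pvSlot "trunk_link" = some ((1 : Int), (1 : Int)) := rfl
      simp [pvBkt, pvLft, e]
    by_cases h4 : c = "primary"
    · subst h4
      rw [List.foldl_cons,
          show pvStepB ([b0, b1, b2, b3, b4], l) "primary"
              = ([b0, b1, b2 ++ [((0 : Int), "primary")], b3, b4], l) from rfl,
          ih]
      have e : PySem.Dict.get? pvSlot "primary" = some ((2 : Int), (0 : Int)) := rfl
      simp [pvBkt, pvLft, e]
    by_cases h5 : c = "primary_link"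
    · subst h5
      rw [List.foldl_cons,
          show pvStepB ([b0, b1, b2, b3, b4], l) "primary_link"
              = ([b0, b1, b2 ++ [((1 : Int), "primary_link")], b3, b4], l) from rfl,
          ih]
      have e : PySem.Dict.get? pvSlot "primary_link" = some ((2 : Int), (1 : Int)) := rfl
      simp [pvBkt, pvLft, e]
    by_cases h6 : c = "secondary"
    · subst h6
      rw [List.foldl_cons,
          show pvStepB ([b0, b1, b2, b3, b4], l) "secondary"
              = ([b0, b1, b2, b3 ++ [((0 : Int), "secondary")], b4], l) from rfl,
          ih]
      have e : PySem.Dict.get? pvSlot "secondary" = some ((3 : Int), (0 : Int)) := rfl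
      simp [pvBkt, pvLft, e]
    by_cases h7 : c = "secondary_link"
    · subst h7
      rw [List.foldl_cons,
          show pvStepB ([b0, b1, b2, b3, b4], l) "secondary_link"
              = ([b0, b1, b2, b3 ++ [((1 : Int), "secondary_link")], b4], l) from rfl,
          ih]
      have e : PySem.Dict.get? pvSlot "secondary_link" = some ((3 : Int), (1 : Int)) := rfl
      simp [pvBkt, pvLft, e]
    by_cases h8 : c = "tertiary"
    · subst h8
      rw [List.foldl_cons,
          show pvStepB ([b0, b1, b2, b3, b4], l) "tertiary"
              = ([b0, b1, b2, b3, b4 ++ [((0 : Int), "tertiary")]], l) from rfl,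
          ih]
      have e : PySem.Dict.get? pvSlot "tertiary" = some ((4 : Int), (0 : Int)) := rfl
      simp [pvBkt, pvLft, e]
    by_cases h9 : c = "tertiary_link"
    · subst h9
      rw [List.foldl_cons,
          show pvStepB ([b0, b1, b2, b3, b4], l) "tertiary_link"
              = ([b0, b1, b2, b3, b4 ++ [((1 : Int), "tertiary_link")]], l) from rfl,
          ih]
      have e : PySem.Dict.get? pvSlot "tertiary_link" = some ((4 : Int), (1 : Int)) := rfl
      simp [pvBkt, pvLft, e]
    · have hn : PySem.Dict.get? pvSlot c = none := pv_get_none c h0 h1 h2 h3 h4 h5 h6 h7 h8 h9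
      rw [List.foldl_cons, show pvStepB ([b0, b1, b2, b3, b4], l) c = ([b0, b1, b2, b3, b4], l ++ [c]) by
        simp [pvStepB, hn], ih]
      simp [pvBkt, pvLft, hn]

lemma pv_slot_cases (c : String) :
    (PySem.Dict.get? pvSlot c = none ∧ ¬c ∈ ROAD_CLASS_PRIORITY_GROUPS.flatten)
  ∨ (c = "motorway" ∧ PySem.Dict.get? pvSlot c = some ((0 : Int), (0 : Int)))
  ∨ (c = "motorway_link" ∧ PySem.Dict.get? pvSlot c = some ((0 : Int), (1 : Int)))
  ∨ (c = "trunk" ∧ PySem.Dict.get? pvSlot c = some ((1 : Int), (0 : Int)))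
  ∨ (c = "trunk_link" ∧ PySem.Dict.get? pvSlot c = some ((1 : Int), (1 : Int)))
  ∨ (c = "primary" ∧ PySem.Dict.get? pvSlot c = some ((2 : Int), (0 : Int)))
  ∨ (c = "primary_link" ∧ PySem.Dict.get? pvSlot c = some ((2 : Int), (1 : Int)))
  ∨ (c = "secondary" ∧ PySem.Dict.get? pvSlot c = some ((3 : Int), (0 : Int)))
  ∨ (c = "secondary_link" ∧ PySem.Dict.get? pvSlot c = some ((3 : Int), (1 : Int)))
  ∨ (c = "tertiary" ∧ PySem.Dict.get? pvSlot c = some ((4 : Int), (0 : Int)))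
  ∨ (c = "tertiary_link" ∧ PySem.Dict.get? pvSlot c = some ((4 : Int), (1 : Int))) := by
  by_cases h0 : c = "motorway"
  · subst h0; exact Or.inr (Or.inl ⟨rfl, rfl⟩)
  by_cases h1 : c = "motorway_link"
  · subst h1; exact Or.inr (Or.inr (Or.inl ⟨rfl, rfl⟩))
  by_cases h2 : c = "trunk"
  · subst h2; exact Or.inr (Or.inr (Or.inr (Or.inl ⟨rfl, rfl⟩)))
  by_cases h3 : c = "trunk_link"
  · subst h3; exact Or.inr (Or.inr (Or.inr (Or.inr (Or.inl ⟨rfl, rfl⟩))))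
  by_cases h4 : c = "primary"
  · subst h4; exact Or.inr (Or.inr (Or.inr (Or.inr (Or.inr (Or.inl ⟨rfl, rfl⟩)))))
  by_cases h5 : c = "primary_link"
  · subst h5; exact Or.inr (Or.inr (Or.inr (Or.inr (Or.inr (Or.inr (Or.inl ⟨rfl, rfl⟩))))))
  by_cases h6 : c = "secondary"
  · subst h6; exact Or.inr (Or.inr (Or.inr (Or.inr (Or.inr (Or.inr (Or.inr (Or.inl ⟨rfl, rfl⟩)))))))
  by_cases h7 : c = "secondary_link"
  · subst h7; exact Or.inr (Or.inr (Or.inr (Or.inr (Or.inr (Or.inr (Or.inr (Or.inr (Or.inl ⟨rfl, rfl⟩))))))))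
  by_cases h8 : c = "tertiary"
  · subst h8; exact Or.inr (Or.inr (Or.inr (Or.inr (Or.inr (Or.inr (Or.inr (Or.inr (Or.inr (Or.inl ⟨rfl, rfl⟩)))))))))
  by_cases h9 : c = "tertiary_link"
  · subst h9; exact Or.inr (Or.inr (Or.inr (Or.inr (Or.inr (Or.inr (Or.inr (Or.inr (Or.inr (Or.inr (⟨rfl, rfl⟩))))))))))
  · exact Or.inl ⟨pv_get_none c h0 h1 h2 h3 h4 h5 h6 h7 h8 h9, by
      simp [ROAD_CLASS_PRIORITY_GROUPS, h0, h1, h2, h3, h4, h5, h6, h7, h8, h9]⟩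


lemma pv_hcase_0 : ∀ (c : String) (gp : Int × Int), PySem.Dict.get? pvSlot c = some gp → gp.1 = 0 →
    (c = "motorway" ∧ gp.2 = 0) ∨ (c = "motorway_link" ∧ gp.2 = 1) := by
  intro c gp hg hgi
  rcases pv_slot_cases c with ⟨hn, -⟩ | ⟨rfl, he⟩ | ⟨rfl, he⟩ | ⟨rfl, he⟩ | ⟨rfl, he⟩ | ⟨rfl, he⟩ | ⟨rfl, he⟩ | ⟨rfl, he⟩ | ⟨rfl, he⟩ | ⟨rfl, he⟩ | ⟨rfl, he⟩
  · rw [hn] at hg; cases hg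
  · rw [he] at hg; injection hg with h; subst h; exact Or.inl ⟨rfl, rfl⟩
  · rw [he] at hg; injection hg with h; subst h; exact Or.inr ⟨rfl, rfl⟩
  · rw [he] at hg; injection hg with h; subst h; exact absurd hgi (by decide)
  · rw [he] at hg; injection hg with h; subst h; exact absurd hgi (by decide)
  · rw [he] at hg; injection hg with h; subst h; exact absurd hgi (by decide)
  · rw [he] at hg; injection hg with h; subst h; exact absurd hgi (by decide)
  · rw [he] at hg; injection hg with h; subst h; exact absurd hgi (by decide)
  · rw [he] at hg; injection hg with h; subst h; exact absurd hgi (by decide)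
  · rw [he] at hg; injection hg with h; subst h; exact absurd hgi (by decide)
  · rw [he] at hg; injection hg with h; subst h; exact absurd hgi (by decide)
lemma pv_hcase_1 : ∀ (c : String) (gp : Int × Int), PySem.Dict.get? pvSlot c = some gp → gp.1 = 1 →
    (c = "trunk" ∧ gp.2 = 0) ∨ (c = "trunk_link" ∧ gp.2 = 1) := by
  intro c gp hg hgi
  rcases pv_slot_cases c with ⟨hn, -⟩ | ⟨rfl, he⟩ | ⟨rfl, he⟩ | ⟨rfl, he⟩ | ⟨rfl, he⟩ | ⟨rfl, he⟩ | ⟨rfl, he⟩ | ⟨rfl, he⟩ | ⟨rfl, he⟩ | ⟨rfl, he⟩ | ⟨rfl, he⟩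
  · rw [hn] at hg; cases hg
  · rw [he] at hg; injection hg with h; subst h; exact absurd hgi (by decide)
  · rw [he] at hg; injection hg with h; subst h; exact absurd hgi (by decide)
  · rw [he] at hg; injection hg with h; subst h; exact Or.inl ⟨rfl, rfl⟩
  · rw [he] at hg; injection hg with h; subst h; exact Or.inr ⟨rfl, rfl⟩
  · rw [he] at hg; injection hg with h; subst h; exact absurd hgi (by decide)
  · rw [he] at hg; injection hg with h; subst h; exact absurd hgi (by decide)
  · rw [he] at hg; injection hg with h; subst h; exact absurd hgi (by decide)
  · rw [he] at hg; injection hg with h; subst h; exact absurd hgi (by decide)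
  · rw [he] at hg; injection hg with h; subst h; exact absurd hgi (by decide)
  · rw [he] at hg; injection hg with h; subst h; exact absurd hgi (by decide)
lemma pv_hcase_2 : ∀ (c : String) (gp : Int × Int), PySem.Dict.get? pvSlot c = some gp → gp.1 = 2 →
    (c = "primary" ∧ gp.2 = 0) ∨ (c = "primary_link" ∧ gp.2 = 1) := by
  intro c gp hg hgi
  rcases pv_slot_cases c with ⟨hn, -⟩ | ⟨rfl, he⟩ | ⟨rfl, he⟩ | ⟨rfl, he⟩ | ⟨rfl, he⟩ | ⟨rfl, he⟩ | ⟨rfl, he⟩ | ⟨rfl, he⟩ | ⟨rfl, he⟩ | ⟨rfl, he⟩ | ⟨rfl, he⟩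
  · rw [hn] at hg; cases hg
  · rw [he] at hg; injection hg with h; subst h; exact absurd hgi (by decide)
  · rw [he] at hg; injection hg with h; subst h; exact absurd hgi (by decide)
  · rw [he] at hg; injection hg with h; subst h; exact absurd hgi (by decide)
  · rw [he] at hg; injection hg with h; subst h; exact absurd hgi (by decide)
  · rw [he] at hg; injection hg with h; subst h; exact Or.inl ⟨rfl, rfl⟩
  · rw [he] at hg; injection hg with h; subst h; exact Or.inr ⟨rfl, rfl⟩
  · rw [he] at hg; injection hg with h; subst h; exact absurd hgi (by decide)
  · rw [he] at hg; injection hg with h; subst h; exact absurd hgi (by decide)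
  · rw [he] at hg; injection hg with h; subst h; exact absurd hgi (by decide)
  · rw [he] at hg; injection hg with h; subst h; exact absurd hgi (by decide)
lemma pv_hcase_3 : ∀ (c : String) (gp : Int × Int), PySem.Dict.get? pvSlot c = some gp → gp.1 = 3 →
    (c = "secondary" ∧ gp.2 = 0) ∨ (c = "secondary_link" ∧ gp.2 = 1) := by
  intro c gp hg hgi
  rcases pv_slot_cases c with ⟨hn, -⟩ | ⟨rfl, he⟩ | ⟨rfl, he⟩ | ⟨rfl, he⟩ | ⟨rfl, he⟩ | ⟨rfl, he⟩ | ⟨rfl, he⟩ | ⟨rfl, he⟩ | ⟨rfl, he⟩ | ⟨rfl, he⟩ | ⟨rfl, he⟩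
  · rw [hn] at hg; cases hg
  · rw [he] at hg; injection hg with h; subst h; exact absurd hgi (by decide)
  · rw [he] at hg; injection hg with h; subst h; exact absurd hgi (by decide)
  · rw [he] at hg; injection hg with h; subst h; exact absurd hgi (by decide)
  · rw [he] at hg; injection hg with h; subst h; exact absurd hgi (by decide)
  · rw [he] at hg; injection hg with h; subst h; exact absurd hgi (by decide)
  · rw [he] at hg; injection hg with h; subst h; exact absurd hgi (by decide)
  · rw [he] at hg; injection hg with h; subst h; exact Or.inl ⟨rfl, rfl⟩
  · rw [he] at hg; injection hg with h; subst h; exact Or.inr ⟨rfl, rfl⟩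
  · rw [he] at hg; injection hg with h; subst h; exact absurd hgi (by decide)
  · rw [he] at hg; injection hg with h; subst h; exact absurd hgi (by decide)
lemma pv_hcase_4 : ∀ (c : String) (gp : Int × Int), PySem.Dict.get? pvSlot c = some gp → gp.1 = 4 →
    (c = "tertiary" ∧ gp.2 = 0) ∨ (c = "tertiary_link" ∧ gp.2 = 1) := by
  intro c gp hg hgi
  rcases pv_slot_cases c with ⟨hn, -⟩ | ⟨rfl, he⟩ | ⟨rfl, he⟩ | ⟨rfl, he⟩ | ⟨rfl, he⟩ | ⟨rfl, he⟩ | ⟨rfl, he⟩ | ⟨rfl, he⟩ | ⟨rfl, he⟩ | ⟨rfl, he⟩ | ⟨rfl, he⟩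
  · rw [hn] at hg; cases hg
  · rw [he] at hg; injection hg with h; subst h; exact absurd hgi (by decide)
  · rw [he] at hg; injection hg with h; subst h; exact absurd hgi (by decide)
  · rw [he] at hg; injection hg with h; subst h; exact absurd hgi (by decide)
  · rw [he] at hg; injection hg with h; subst h; exact absurd hgi (by decide)
  · rw [he] at hg; injection hg with h; subst h; exact absurd hgi (by decide)
  · rw [he] at hg; injection hg with h; subst h; exact absurd hgi (by decide)
  · rw [he] at hg; injection hg with h; subst h; exact absurd hgi (by decide)
  · rw [he] at hg; injection hg with h; subst h; exact absurd hgi (by decide)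
  · rw [he] at hg; injection hg with h; subst h; exact Or.inl ⟨rfl, rfl⟩
  · rw [he] at hg; injection hg with h; subst h; exact Or.inr ⟨rfl, rfl⟩


lemma pv_bkt_snd (i : Int) (c : String) (x : Int × String)
    (h : (match PySem.Dict.get? pvSlot c with
          | some gp => if gp.1 = i then some (gp.2, c) else none
          | none => none) = some x) : x.2 = c := by
  cases hg : PySem.Dict.get? pvSlot c with
  | none => simp only [hg] at h; cases h
  | some gp =>
    simp only [hg] at h
    split at h
    · injection h with h'; subst h'; rfl
    · cases h

lemma pv_bkt_nodup (i : Int) (R : List String) (hR : R.Nodup) : (pvBkt i R).Nodup := by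
  apply List.Nodup.filterMap _ hR
  intro c c' x hx hx'
  rw [Option.mem_def] at hx hx'
  rw [← pv_bkt_snd i c x hx, ← pv_bkt_snd i c' x hx']

lemma pv_bkt_mem (i : Int) (a b : String) (R : List String)
    (hcase : ∀ (c : String) (gp : Int × Int), PySem.Dict.get? pvSlot c = some gp → gp.1 = i →
      (c = a ∧ gp.2 = 0) ∨ (c = b ∧ gp.2 = 1))
    (ha : PySem.Dict.get? pvSlot a = some (i, 0))
    (hb : PySem.Dict.get? pvSlot b = some (i, 1))
    (x : Int × String) :
    x ∈ pvBkt i R ↔ ((x = (0, a) ∧ a ∈ R) ∨ (x = (1, b) ∧ b ∈ R)) := by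
  unfold pvBkt
  rw [List.mem_filterMap]
  constructor
  · rintro ⟨c, hc, hfc⟩
    cases hg : PySem.Dict.get? pvSlot c with
    | none => simp only [hg] at hfc; cases hfc
    | some gp =>
      simp only [hg] at hfc
      by_cases hgi : gp.1 = i
      · rw [if_pos hgi] at hfc
        injection hfc with h'
        rcases hcase c gp hg hgi with ⟨rfl, h2⟩ | ⟨rfl, h2⟩
        · exact Or.inl ⟨by rw [← h', h2], hc⟩
        · exact Or.inr ⟨by rw [← h', h2], hc⟩
      · rw [if_neg hgi] at hfc; cases hfc
  · rintro (⟨rfl, hm⟩ | ⟨rfl, hm⟩)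
    · exact ⟨a, hm, by simp [ha]⟩
    · exact ⟨b, hm, by simp [hb]⟩

lemma pv_bkt_sorted (i : Int) (a b : String) (R : List String) (hR : R.Nodup) (hab : a ≠ b)
    (hcase : ∀ (c : String) (gp : Int × Int), PySem.Dict.get? pvSlot c = some gp → gp.1 = i →
      (c = a ∧ gp.2 = 0) ∨ (c = b ∧ gp.2 = 1))
    (ha : PySem.Dict.get? pvSlot a = some (i, 0))
    (hb : PySem.Dict.get? pvSlot b = some (i, 1)) :
    PySem.List.sorted (pvBkt i R) (fun pc => pc.1)
      = (if a ∈ R then [((0 : Int), a)] else []) ++ (if b ∈ R then [((1 : Int), b)] else []) := by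
  apply PySem.List.sorted_eq_of_perm_of_pairwise_lt
  · rw [List.perm_ext_iff_of_nodup _ (pv_bkt_nodup i R hR)]
    · intro x
      rw [pv_bkt_mem i a b R hcase ha hb]
      by_cases haR : a ∈ R <;> by_cases hbR : b ∈ R <;>
        simp [haR, hbR]
    · by_cases haR : a ∈ R <;> by_cases hbR : b ∈ R <;> simp [haR, hbR, hab]
  · by_cases haR : a ∈ R <;> by_cases hbR : b ∈ R <;> simp [haR, hbR]

lemma pv_emit_eq (acc : List (List String)) (i : Int) (a b : String) (R : List String)
    (hR : R.Nodup) (hab : a ≠ b)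
    (hcase : ∀ (c : String) (gp : Int × Int), PySem.Dict.get? pvSlot c = some gp → gp.1 = i →
      (c = a ∧ gp.2 = 0) ∨ (c = b ∧ gp.2 = 1))
    (ha : PySem.Dict.get? pvSlot a = some (i, 0))
    (hb : PySem.Dict.get? pvSlot b = some (i, 1)) :
    pvEmitB acc (pvBkt i R)
      = if pvPick R [a, b] = [] then acc else acc ++ [pvPick R [a, b]] := by
  have hmap : (PySem.List.sorted (pvBkt i R) (fun pc => pc.1)).map (fun pc => pc.2)
      = pvPick R [a, b] := by
    rw [pv_bkt_sorted i a b R hR hab hcase ha hb]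
    by_cases haR : a ∈ R <;> by_cases hbR : b ∈ R <;>
      simp [pvPick, PySem.Set.contains, haR, hbR]
  by_cases hbE : pvBkt i R = []
  · have hpE : pvPick R [a, b] = [] := by
      rw [← hmap, hbE]; rfl
    simp [pvEmitB, hbE, hpE]
  · have hpE : pvPick R [a, b] ≠ [] := by
      rw [← hmap]
      simp [PySem.List.sorted_eq_nil_iff, hbE]
    simp [pvEmitB, hbE, hpE, hmap]

lemma pv_lft_eq (R : List String) :
    R.filter (fun c => !ROAD_CLASS_PRIORITY_GROUPS.flatten.contains c) = pvLft R := by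
  unfold pvLft
  apply List.filter_congr
  intro c _
  rcases pv_slot_cases c with ⟨hn, hm⟩ | h | h | h | h | h | h | h | h | h | h
  · simp [hn, hm]
  all_goals (obtain ⟨rfl, he⟩ := h; rw [he]; decide)

-- ===== VERDICT (by name: the statement is the Claim_ definition above) =====
theorem prioritize_road_classes_spec : Claim_equal_prioritize_road_classes := by
  intro classes _
  unfold Spec_prioritize_road_classes prioritize_road_classes prioritize_road_classes_alt
  have hR : (PySem.Set.ofList ((classes.map PySem.Str.strip).filter (fun s => s ≠ ""))).Nodup :=
    PySem.Set.nodup_ofList _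
  set R := PySem.Set.ofList ((classes.map PySem.Str.strip).filter (fun s => s ≠ "")) with hRdef
  have e0 : ∀ acc, pvEmitB acc (pvBkt 0 R)
      = if pvPick R ["motorway", "motorway_link"] = [] then acc
        else acc ++ [pvPick R ["motorway", "motorway_link"]] :=
    fun acc => pv_emit_eq acc 0 "motorway" "motorway_link" R hR (by decide) pv_hcase_0 rfl rfl
  have e1 : ∀ acc, pvEmitB acc (pvBkt 1 R)
      = if pvPick R ["trunk", "trunk_link"] = [] then acc
        else acc ++ [pvPick R ["trunk", "trunk_link"]] :=
    fun acc => pv_emit_eq acc 1 "trunk" "trunk_link" R hR (by decide) pv_hcase_1 rfl rfl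
  have e2 : ∀ acc, pvEmitB acc (pvBkt 2 R)
      = if pvPick R ["primary", "primary_link"] = [] then acc
        else acc ++ [pvPick R ["primary", "primary_link"]] :=
    fun acc => pv_emit_eq acc 2 "primary" "primary_link" R hR (by decide) pv_hcase_2 rfl rfl
  have e3 : ∀ acc, pvEmitB acc (pvBkt 3 R)
      = if pvPick R ["secondary", "secondary_link"] = [] then acc
        else acc ++ [pvPick R ["secondary", "secondary_link"]] :=
    fun acc => pv_emit_eq acc 3 "secondary" "secondary_link" R hR (by decide) pv_hcase_3 rfl rfl
  have e4 : ∀ acc, pvEmitB acc (pvBkt 4 R)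
      = if pvPick R ["tertiary", "tertiary_link"] = [] then acc
        else acc ++ [pvPick R ["tertiary", "tertiary_link"]] :=
    fun acc => pv_emit_eq acc 4 "tertiary" "tertiary_link" R hR (by decide) pv_hcase_4 rfl rfl
  simp only [pv_foldB R [] [] [] [] [] []]
  rw [pv_foldA ROAD_CLASS_PRIORITY_GROUPS [] R (by decide)]
  rw [pv_lft_eq R]
  simp only [List.nil_append, List.foldl_cons, List.foldl_nil, ROAD_CLASS_PRIORITY_GROUPS,
    e0, e1, e2, e3, e4]
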